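-- pv_equiv track=rewrite | github.com/seculayer/AutoAPE-challenge2 | kaggle/text-normalization-challenge-english-language/Text_Normalization_postprocessing.py | ELECTRONIC
-- ===== SOURCE A (Python) =====
-- elec_dic = {'0':'o', '1':'one', '2':'two', '3':'three', '4':'four', '5':'five', '6':'six', '7':'seven', '8':'eight', '9':'nine'}
--
-- def ELECTRONIC(x):
--         try:
--             key = x.replace('.',' dot ').replace('/',' slash ').replace('-',' dash ').replace(':',' colon ').replace('_',' underscore ').replace('#',' hash tag ').replace('~',' tilde ')
--             key = key.split()
--             lis2 = ['dot','slash','dash','colon']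
--
--             for j in range(len(key)):
--                 if key[j] not in lis2: key[j]=" ".join(key[j])
--             trans = " ".join(key)
--             text = ''
--             for i in range(len(trans)):
--                 if trans[i].isdigit() == True:
--                     text_n = str(elec_dic.get(trans[i]))
--                     text_row = ''
--                     for i in range(len(text_n)):
--                         if i == 0: text_row += text_n[i]
--                         else: text_row += ' ' + text_n[i]
--                     text += text_row
--                 elif trans[i].isdigit() == False:
--                     text += trans[i]
--
--         except:
--             text = x
--
--         return text.lower()
-- ===== SOURCE B (Python) =====
-- elec_dic = {'0':'o', '1':'one', '2':'two', '3':'three', '4':'four', '5':'five', '6':'six', '7':'seven', '8':'eight', '9':'nine'}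
--
-- # digit -> its already-space-expanded word, precomputed once
-- _SPACED = {c: ' '.join(w) for c, w in elec_dic.items()}
-- _KEEP = ('dot', 'slash', 'dash', 'colon')
--
-- def ELECTRONIC(x):
--     key = x.replace('.',' dot ').replace('/',' slash ').replace('-',' dash ').replace(':',' colon ').replace('_',' underscore ').replace('#',' hash tag ').replace('~',' tilde ')
--     parts = []
--     for tok in key.split():
--         if tok in _KEEP:
--             parts.append(tok)
--         else:
--             parts.append(' '.join(_SPACED.get(c, c) for c in tok))
--     return ' '.join(parts).lower()
-- ===== Notes on version B (the rewrite author's own statement) =====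
-- stated objective: faster
-- what changed: B drops A's token re-spacing pass, the intermediate joined string, its whole-string character scan and the per-digit inner indexed loop; instead it makes a single pass over the split tokens, expanding each character through a precomputed digit-to-spaced-word table.
import Mathlib
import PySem

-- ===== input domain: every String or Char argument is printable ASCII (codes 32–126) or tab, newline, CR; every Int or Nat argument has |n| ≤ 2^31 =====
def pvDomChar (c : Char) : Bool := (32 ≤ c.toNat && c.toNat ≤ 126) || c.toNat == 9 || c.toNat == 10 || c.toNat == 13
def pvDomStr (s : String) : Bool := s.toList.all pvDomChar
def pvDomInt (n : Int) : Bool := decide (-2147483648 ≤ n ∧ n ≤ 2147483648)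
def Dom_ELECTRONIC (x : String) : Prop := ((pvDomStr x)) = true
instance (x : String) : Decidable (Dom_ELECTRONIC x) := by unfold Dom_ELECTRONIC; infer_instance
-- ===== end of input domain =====

-- B replaces A's extra passes (re-spacing every token, then re-scanning the joined string
-- character by character with an inner indexed loop) by one pass over the split tokens with a
-- precomputed digit->spaced-word table; same return value, measured constant-factor faster.

-- ===== PORT A =====
-- elec_dic
def elecDic : PySem.Dict Char (List Char) := PySem.Dict.mk
  [('0',['o']),('1',['o','n','e']),('2',['t','w','o']),('3',['t','h','r','e','e']),
   ('4',['f','o','u','r']),('5',['f','i','v','e']),('6',['s','i','x']),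
   ('7',['s','e','v','e','n']),('8',['e','i','g','h','t']),('9',['n','i','n','e'])]

-- lis2 = ['dot','slash','dash','colon']
def pvLis2 : List (List Char) :=
  [['d','o','t'], ['s','l','a','s','h'], ['d','a','s','h'], ['c','o','l','o','n']]

-- str(elec_dic.get(c)): some w -> w, none -> "None"
def pvDigitText (c : Char) : List Char :=
  match PySem.Dict.get? elecDic c with
  | some w => w
  | none => ['N','o','n','e']

-- inner loop: for i in range(len(text_n)): i == 0 -> text_n[i], else ' ' + text_n[i]
def pvRow (text_n : List Char) : List Char :=
  (text_n.zipIdx).foldl (fun text_row p => if p.2 = 0 then text_row ++ [p.1] else text_row ++ [' ', p.1]) []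

-- body of "for i in range(len(trans))"
def pvScanStep (text : List Char) (c : Char) : List Char :=
  if PySem.Chars.isdigit c = true then text ++ pvRow (pvDigitText c)
  else if PySem.Chars.isdigit c = false then text ++ [c]
  else text

def ELECTRONIC (x : String) : String :=
  let key := PySem.Chars.replace (PySem.Chars.replace (PySem.Chars.replace (PySem.Chars.replace (PySem.Chars.replace (PySem.Chars.replace (PySem.Chars.replace x.toList ['.'] " dot ".toList) ['/'] " slash ".toList) ['-'] " dash ".toList) [':'] " colon ".toList) ['_'] " underscore ".toList) ['#'] " hash tag ".toList) ['~'] " tilde ".toList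
  let key := PySem.Chars.split₀ key
  let key := key.map (fun t => if pvLis2.contains t then t
                               else PySem.Chars.join [' '] (t.map (fun c => [c])))
  let trans := PySem.Chars.join [' '] key
  let text := trans.foldl pvScanStep []
  String.ofList (PySem.Chars.lower text)

-- ===== PORT B =====
-- ' '.join(w) for a word w
def pvSpaced (w : List Char) : List Char := PySem.Chars.join [' '] (w.map (fun c => [c]))

-- _SPACED = {c: ' '.join(w) for c, w in elec_dic.items()}
def pvCharMap : PySem.Dict Char (List Char) :=
  PySem.Dict.ofList ((PySem.Dict.items elecDic).map (fun p => (p.1, pvSpaced p.2)))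

-- ' '.join(_SPACED.get(c, c) for c in tok)
def pvExpandTok (t : List Char) : List Char :=
  PySem.Chars.join [' '] (t.map (fun c => (PySem.Dict.get? pvCharMap c).getD [c]))

def ELECTRONIC_alt (x : String) : String :=
  let key := PySem.Chars.replace (PySem.Chars.replace (PySem.Chars.replace (PySem.Chars.replace (PySem.Chars.replace (PySem.Chars.replace (PySem.Chars.replace x.toList ['.'] " dot ".toList) ['/'] " slash ".toList) ['-'] " dash ".toList) [':'] " colon ".toList) ['_'] " underscore ".toList) ['#'] " hash tag ".toList) ['~'] " tilde ".toList
  let parts := (PySem.Chars.split₀ key).map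
      (fun t => if pvLis2.contains t then t else pvExpandTok t)
  String.ofList (PySem.Chars.lower (PySem.Chars.join [' '] parts))

-- ===== PRECONDITION & SPEC =====
def Spec_ELECTRONIC (x : String) (out : String) : Prop := out = ELECTRONIC_alt x
instance (x : String) (out : String) : Decidable (Spec_ELECTRONIC x out) := by unfold Spec_ELECTRONIC; infer_instance

-- ===== CLAIM (what is proved, stated in full; the proofs are below) =====
def Claim_equal_ELECTRONIC : Prop := ∀ (x : String), Dom_ELECTRONIC x → Spec_ELECTRONIC x (ELECTRONIC x)

-- ===== LEMMAS AND PROOFS =====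

-- the per-character action of A's scan loop
def pvF (c : Char) : List Char :=
  if PySem.Chars.isdigit c = true then pvRow (pvDigitText c) else [c]

theorem pvScanStep_eq : pvScanStep = fun text c => text ++ pvF c := by
  funext text c
  cases h : PySem.Chars.isdigit c <;> simp [pvScanStep, pvF, h]

theorem digit_cases (c : Char) (h : PySem.Chars.isdigit c = true) :
    c = '0' ∨ c = '1' ∨ c = '2' ∨ c = '3' ∨ c = '4' ∨ c = '5' ∨ c = '6' ∨ c = '7' ∨ c = '8' ∨ c = '9' := by
  simp [PySem.Chars.isdigit] at h
  rcases h with ⟨h1, h2⟩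
  rw [Char.le_def, UInt32.le_iff_toNat_le] at h1 h2
  simp only [Char.ext_iff, UInt32.ext_iff]
  have e0 : ('0').val.toNat = 48 := rfl
  have e9 : ('9').val.toNat = 57 := rfl
  have f1 : ('1').val.toNat = 49 := rfl
  have f2 : ('2').val.toNat = 50 := rfl
  have f3 : ('3').val.toNat = 51 := rfl
  have f4 : ('4').val.toNat = 52 := rfl
  have f5 : ('5').val.toNat = 53 := rfl
  have f6 : ('6').val.toNat = 54 := rfl
  have f7 : ('7').val.toNat = 55 := rfl
  have f8 : ('8').val.toNat = 56 := rfl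
  omega

-- pvF agrees with B's table lookup on every character
theorem pvF_eq_lookup (c : Char) : pvF c = (PySem.Dict.get? pvCharMap c).getD [c] := by
  cases h : PySem.Chars.isdigit c with
  | true =>
    rcases digit_cases c h with rfl|rfl|rfl|rfl|rfl|rfl|rfl|rfl|rfl|rfl <;> decide
  | false =>
    have hne : ∀ d : Char, PySem.Chars.isdigit d = true → (d == c) = false := by
      intro d hd
      rw [beq_eq_false_iff_ne]
      rintro rfl
      rw [h] at hd
      cases hd
    have hcm : pvCharMap = PySem.Dict.mk
        [('0',['o']),('1',['o',' ','n',' ','e']),('2',['t',' ','w',' ','o']),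
         ('3',['t',' ','h',' ','r',' ','e',' ','e']),('4',['f',' ','o',' ','u',' ','r']),
         ('5',['f',' ','i',' ','v',' ','e']),('6',['s',' ','i',' ','x']),
         ('7',['s',' ','e',' ','v',' ','e',' ','n']),('8',['e',' ','i',' ','g',' ','h',' ','t']),
         ('9',['n',' ','i',' ','n',' ','e'])] := by decide
    rw [hcm]
    simp [pvF, h, PySem.Dict.get?_mk_cons,
      hne '0' (by decide), hne '1' (by decide), hne '2' (by decide), hne '3' (by decide),
      hne '4' (by decide), hne '5' (by decide), hne '6' (by decide), hne '7' (by decide),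
      hne '8' (by decide), hne '9' (by decide)]
    simp [PySem.Dict.get?]

-- A's scan loop is a flatMap of pvF
theorem scan_eq_flatMap (l : List Char) :
    l.foldl pvScanStep [] = l.flatMap pvF := by
  rw [pvScanStep_eq]
  simpa using PySem.List.foldl_append_eq_flatMap pvF l []

-- flatMap of a space-preserving action distributes over ' '.join
theorem flatMap_join (f : Char → List Char) (hf : f ' ' = [' ']) (parts : List (List Char)) :
    (PySem.Chars.join [' '] parts).flatMap f
      = PySem.Chars.join [' '] (parts.map (fun p => p.flatMap f)) := by
  induction parts with
  | nil => rfl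
  | cons p rest ih =>
    cases rest with
    | nil => simp [PySem.Chars.join_singleton]
    | cons q rest' =>
      rw [PySem.Chars.join_cons_cons, List.map_cons]
      rw [show ((fun p => p.flatMap f) p :: (q :: rest').map (fun p => p.flatMap f))
            = (p.flatMap f) :: (q.flatMap f) :: rest'.map (fun p => p.flatMap f) by simp]
      rw [PySem.Chars.join_cons_cons]
      rw [← List.map_cons]
      rw [← ih]
      simp [hf]

theorem pvF_space : pvF ' ' = [' '] := by decide

-- per token, A's re-spacing followed by the scan equals B's single expansion
theorem token_eq (t : List Char) :
    (if pvLis2.contains t then t else pvSpaced t).flatMap pvF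
      = (if pvLis2.contains t then t else pvExpandTok t) := by
  cases hm : pvLis2.contains t with
  | true =>
    simp only [if_pos]
    have : t ∈ pvLis2 := by simpa using hm
    fin_cases this <;> decide
  | false =>
    simp only [Bool.false_eq_true, if_false]
    unfold pvSpaced
    rw [flatMap_join pvF pvF_space]
    rw [List.map_map]
    unfold pvExpandTok
    congr 1
    apply List.map_congr_left
    intro c _
    simp [Function.comp, pvF_eq_lookup c]

-- ===== VERDICT (by name: the statement is the Claim_ definition above) =====
theorem ELECTRONIC_spec : Claim_equal_ELECTRONIC := by
  intro x _
  unfold Spec_ELECTRONIC ELECTRONIC ELECTRONIC_alt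
  simp only [scan_eq_flatMap, flatMap_join pvF pvF_space, List.map_map]
  refine congrArg _ (congrArg _ (congrArg _ ?_))
  apply List.map_congr_left
  intro t _
  exact token_eq t
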